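-- pv_equiv track=rewrite | github.com/nhatlinh224/AIO-Daily-with-Tri-Hoang | Exercise_list/sec9_interpolation_for_list.py | nearest_neighbor_interpolation
-- ===== SOURCE A (Python) =====
-- def nearest_neighbor_interpolation(data):
--     # Iterate through the list to find None values
--     for i in range(len(data)):
--         if data[i] is None:
--             # Find the nearest non-None value
--             left = i - 1
--             right = i + 1
--
--             while left >= 0 and data[left] is None:
--                 left -= 1
--             while right < len(data) and data[right] is None:
--                 right += 1
--
--             # Determine which non-None value is closer
--             if left >= 0 and (right >= len(data) or (i - left) <= (right - i)):
--                 data[i] = data[left]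
--             elif right < len(data):
--                 data[i] = data[right]
--
--     return data
-- ===== SOURCE B (Python) =====
-- def nearest_neighbor_interpolation(data):
--     # Forward-fill with the last seen value; leading Nones take the
--     # first non-None value of the whole list. Mutates data in place like A.
--     first = None
--     for v in data:
--         if v is not None:
--             first = v
--             break
--     if first is None:
--         return data
--     out = []
--     last = None
--     for v in data:
--         if v is None:
--             out.append(first if last is None else last)
--         else:
--             last = v
--             out.append(v)
--     data[:] = out
--     return data
-- ===== Notes on version B (the rewrite author's own statement) =====
-- stated objective: alternative
-- what changed: Replaced the per-None left/right scans over the mutated list by a single forward pass that carries the last seen value and pre-computes the first non-None value for leading Nones.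
import Mathlib
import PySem

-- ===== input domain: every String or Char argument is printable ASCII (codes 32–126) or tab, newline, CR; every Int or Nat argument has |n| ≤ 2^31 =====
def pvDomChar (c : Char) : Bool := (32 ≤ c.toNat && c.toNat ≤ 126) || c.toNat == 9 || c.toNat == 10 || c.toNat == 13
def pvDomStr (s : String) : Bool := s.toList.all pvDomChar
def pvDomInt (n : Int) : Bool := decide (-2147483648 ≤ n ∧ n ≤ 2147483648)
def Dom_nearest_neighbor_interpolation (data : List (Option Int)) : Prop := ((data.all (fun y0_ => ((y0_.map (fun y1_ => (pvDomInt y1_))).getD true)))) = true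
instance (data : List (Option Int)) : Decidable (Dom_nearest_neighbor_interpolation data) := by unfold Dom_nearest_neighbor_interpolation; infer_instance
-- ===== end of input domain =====

-- B replaces A's per-None left/right scans by a single forward pass carrying the
-- last seen value (leading Nones take the precomputed first non-None value).
-- Both A and B mutate the argument list in place in Python; the equivalence here
-- is about the (identical) returned value.

-- ===== PORT A =====
-- 'while left >= 0 and data[left] is None: left -= 1'
def pyWhileLeft (d : List (Option Int)) (left : Int) : Int :=
  if 0 ≤ left ∧ PySem.List.pyGetD d left none = none then
    pyWhileLeft d (left - 1)
  else left
termination_by (left + 1).toNat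
decreasing_by omega

-- 'while right < len(data) and data[right] is None: right += 1'
def pyWhileRight (d : List (Option Int)) (right : Int) : Int :=
  if right < (d.length : Int) ∧ PySem.List.pyGetD d right none = none then
    pyWhileRight d (right + 1)
  else right
termination_by ((d.length : Int) - right).toNat
decreasing_by omega

-- body of A's for-loop for one index i (the list is mutated in place)
def stepA (d : List (Option Int)) (i : Nat) : List (Option Int) :=
  if PySem.List.pyGetD d (i : Int) none = none then
    let left := pyWhileLeft d ((i : Int) - 1)
    let right := pyWhileRight d ((i : Int) + 1)
    if 0 ≤ left ∧ ((d.length : Int) ≤ right ∨ (i : Int) - left ≤ right - (i : Int)) then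
      d.set i (PySem.List.pyGetD d left none)
    else if right < (d.length : Int) then
      d.set i (PySem.List.pyGetD d right none)
    else d
  else d

def nearest_neighbor_interpolation (data : List (Option Int)) : List (Option Int) :=
  (List.range data.length).foldl stepA data

-- ===== PORT B =====
-- 'for v in data: if v is not None: first = v; break'
def firstB : List (Option Int) → Option Int
  | [] => none
  | v :: rest => if v ≠ none then v else firstB rest

-- body of B's building loop: state = (out, last)
def fillStep (first : Option Int) (acc : List (Option Int) × Option Int)
    (v : Option Int) : List (Option Int) × Option Int :=
  match v with
  | none => (acc.1 ++ [if acc.2 = none then first else acc.2], acc.2)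
  | some k => (acc.1 ++ [some k], some k)

def nearest_neighbor_interpolation_alt (data : List (Option Int)) : List (Option Int) :=
  let first := firstB data
  if first = none then data
  else (data.foldl (fillStep first) ([], none)).1

-- ===== PRECONDITION & SPEC =====
def Spec_nearest_neighbor_interpolation (data : List (Option Int)) (out : List (Option Int)) : Prop := out = nearest_neighbor_interpolation_alt data
instance (data : List (Option Int)) (out : List (Option Int)) : Decidable (Spec_nearest_neighbor_interpolation data out) := by unfold Spec_nearest_neighbor_interpolation; infer_instance

-- ===== CLAIM (what is proved, stated in full; the proofs are below) =====
def Claim_equal_nearest_neighbor_interpolation : Prop := ∀ (data : List (Option Int)), Dom_nearest_neighbor_interpolation data → Spec_nearest_neighbor_interpolation data (nearest_neighbor_interpolation data)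

-- ===== LEMMAS AND PROOFS =====

-- canonical description of the fill: forward pass with (first, last)
def fillGo (first last : Option Int) : List (Option Int) → List (Option Int)
  | [] => []
  | none :: rest => (if last = none then first else last) :: fillGo first last rest
  | some k :: rest => some k :: fillGo first (some k) rest

-- running 'last non-None value' of a list, seeded with last
def lastNN (last : Option Int) (l : List (Option Int)) : Option Int :=
  l.foldl (fun a v => if v = none then a else v) last

theorem fillGo_length (f last : Option Int) (l : List (Option Int)) :
    (fillGo f last l).length = l.length := by
  induction l generalizing last with
  | nil => rfl
  | cons x rest ih => cases x <;> simp [fillGo, ih]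

theorem fillGo_append (f last : Option Int) (xs ys : List (Option Int)) :
    fillGo f last (xs ++ ys) = fillGo f last xs ++ fillGo f (lastNN last xs) ys := by
  induction xs generalizing last with
  | nil => rfl
  | cons x rest ih => cases x <;> simp [fillGo, lastNN, List.foldl] <;> simp [ih, lastNN]

theorem fillGo_all_some (f last : Option Int) (l : List (Option Int)) (hf : f ≠ none) :
    ∀ x ∈ fillGo f last l, x ≠ none := by
  induction l generalizing last with
  | nil => simp [fillGo]
  | cons x rest ih =>
    cases x with
    | none =>
      intro y hy
      simp only [fillGo, List.mem_cons] at hy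
      rcases hy with h | h
      · subst h; split <;> simp_all
      · exact ih last y h
    | some k =>
      intro y hy
      simp only [fillGo, List.mem_cons] at hy
      rcases hy with h | h
      · subst h; simp
      · exact ih (some k) y h

theorem getLast?_cons_ne {α : Type} (a : α) (l : List α) (h : l ≠ []) :
    (a :: l).getLast? = l.getLast? := by
  cases l with
  | nil => exact absurd rfl h
  | cons b t => exact List.getLast?_cons_cons

theorem fillGo_ne_nil (f last : Option Int) (l : List (Option Int)) (h : l ≠ []) :
    fillGo f last l ≠ [] := by
  intro hc
  have := fillGo_length f last l
  rw [hc] at this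
  simp at this
  exact h (List.eq_nil_of_length_eq_zero this.symm)

theorem fillGo_getLast (f : Option Int) (l : List (Option Int)) :
    ∀ last, l ≠ [] →
      (fillGo f last l).getLast? = some (if lastNN last l = none then f else lastNN last l) := by
  induction l with
  | nil => simp
  | cons x rest ih =>
    intro last _
    by_cases hr : rest = []
    · subst hr
      cases x <;> simp [fillGo, lastNN]
    · cases x with
      | none =>
        simp only [fillGo]
        rw [getLast?_cons_ne _ _ (fillGo_ne_nil f last rest hr), ih last hr]
        simp [lastNN]
      | some k =>
        simp only [fillGo]
        rw [getLast?_cons_ne _ _ (fillGo_ne_nil f (some k) rest hr), ih (some k) hr]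
        simp [lastNN]

-- B's foldl accumulates exactly fillGo
theorem foldB_eq_fillGo (f : Option Int) (l : List (Option Int)) :
    ∀ acc last, (l.foldl (fillStep f) (acc, last)).1 = acc ++ fillGo f last l := by
  induction l with
  | nil => simp [fillGo]
  | cons x rest ih =>
    intro acc last
    cases x <;> simp [List.foldl, fillStep, ih, fillGo]

theorem firstB_eq_none_iff (l : List (Option Int)) :
    firstB l = none ↔ ∀ x ∈ l, x = none := by
  induction l with
  | nil => simp [firstB]
  | cons x rest ih =>
    cases x <;> simp [firstB, ih]

theorem firstB_of_prefix_none (l : List (Option Int)) :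
    ∀ m : Nat, (∀ j < m, l.getD j none = none) → m < l.length → l.getD m none ≠ none →
      firstB l = l.getD m none := by
  induction l with
  | nil => intro m _ h; simp at h
  | cons x rest ih =>
    intro m hpre hm hx
    cases m with
    | zero => simp_all [firstB]
    | succ m' =>
      have hx0 : x = none := by
        have := hpre 0 (by omega); simpa using this
      subst hx0
      simp only [firstB, ne_eq, not_true_eq_false, if_false, List.getD_cons_succ] at *
      exact ih m' (fun j hj => by have := hpre (j+1) (by omega); simpa using this)
        (by simpa using hm) hx

theorem pyWhileLeft_props (d : List (Option Int)) (l : Int) :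
    pyWhileLeft d l ≤ l ∧
      (0 ≤ pyWhileLeft d l → PySem.List.pyGetD d (pyWhileLeft d l) none ≠ none) := by
  rw [pyWhileLeft]
  split
  · rename_i h
    have := pyWhileLeft_props d (l - 1)
    exact ⟨by omega, this.2⟩
  · rename_i h
    refine ⟨le_refl _, fun h0 => ?_⟩
    intro hc; exact h ⟨h0, hc⟩
termination_by (l + 1).toNat
decreasing_by omega

theorem pyWhileRight_props (d : List (Option Int)) (r : Int) :
    r ≤ pyWhileRight d r ∧
      (∀ j : Int, r ≤ j → j < pyWhileRight d r → PySem.List.pyGetD d j none = none) ∧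
      (pyWhileRight d r < d.length → PySem.List.pyGetD d (pyWhileRight d r) none ≠ none) ∧
      (r ≤ d.length → pyWhileRight d r ≤ d.length) := by
  rw [pyWhileRight]
  split
  · rename_i h
    obtain ⟨h1, h2, h3, h4⟩ := pyWhileRight_props d (r + 1)
    refine ⟨by omega, ?_, h3, fun _ => h4 (by omega)⟩
    intro j hj hj2
    by_cases hje : j = r
    · subst hje; exact h.2
    · exact h2 j (by omega) hj2
  · rename_i h
    refine ⟨le_refl _, fun j hj hj2 => by omega, fun hlt => ?_, fun h4 => ?_⟩
    · intro hc; exact h ⟨hlt, hc⟩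
    · exact h4
termination_by ((d.length : Int) - r).toNat
decreasing_by omega

theorem allnone_pyGetD (d : List (Option Int)) (hall : ∀ x ∈ d, x = none) (j : Int) :
    PySem.List.pyGetD d j none = none := by
  by_cases h : PySem.Raise.InRange d.length j
  · exact hall _ (PySem.List.pyGetD_mem d none h)
  · simp [PySem.List.pyGetD, (PySem.List.pyGet?_eq_none_iff d j).2 h]

theorem foldl_stepA_fixed (data : List (Option Int)) (hall : ∀ i, stepA data i = data) :
    ∀ l : List Nat, l.foldl stepA data = data := by
  intro l
  induction l with
  | nil => rfl
  | cons x t ih => simp [List.foldl, hall x, ih]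

theorem set_append_length {α : Type} (P q : List α) (v : α) :
    (P ++ q).set P.length v = P ++ q.set 0 v := by
  induction P with
  | nil => rfl
  | cons x t ih => simp [ih]

theorem set_append_cons {α : Type} (P rest : List α) (x v : α) (i : Nat)
    (h : i = P.length) : (P ++ x :: rest).set i v = P ++ v :: rest := by
  subst h
  rw [set_append_length]
  rfl

-- the all-None case: every step of A is the identity
theorem stepA_allnone (data : List (Option Int)) (hall : ∀ x ∈ data, x = none) (i : Nat) :
    stepA data i = data := by
  unfold stepA
  simp only [allnone_pyGetD data hall, if_true]
  have hl := pyWhileLeft_props data ((i : Int) - 1)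
  have hr := pyWhileRight_props data ((i : Int) + 1)
  have hlneg : pyWhileLeft data ((i : Int) - 1) < 0 := by
    by_contra hc
    exact hl.2 (by omega) (allnone_pyGetD data hall _)
  have hrbig : ¬ pyWhileRight data ((i : Int) + 1) < (data.length : Int) := by
    intro hc
    exact hr.2.2.1 hc (allnone_pyGetD data hall _)
  rw [if_neg (by omega), if_neg hrbig]

-- main invariant for the non-trivial (first ≠ none) case
theorem inv_stepA (data : List (Option Int)) (hf : firstB data ≠ none) :
    ∀ i, i ≤ data.length →
      (List.range i).foldl stepA data =
        fillGo (firstB data) none (data.take i) ++ data.drop i := by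
  intro i
  induction i with
  | zero => simp [fillGo]
  | succ i ih =>
    intro hi
    have hi' : i < data.length := by omega
    rw [List.range_succ, List.foldl_append, ih (by omega)]
    set f := firstB data with hfdef
    set P := fillGo f none (data.take i) with hPdef
    have hPlen : P.length = i := by
      rw [hPdef, fillGo_length, List.length_take]; omega
    set s := P ++ data.drop i with hsdef
    have hslen : s.length = data.length := by
      rw [hsdef]; simp [hPlen]; omega
    have hsi : s.getD i none = data.getD i none := by
      rw [List.getD_eq_getElem?_getD, List.getD_eq_getElem?_getD, hsdef,
        List.getElem?_append_right (by omega), hPlen, Nat.sub_self, List.getElem?_drop,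
        Nat.add_zero]
    have htake : data.take (i + 1) = data.take i ++ [data[i]] := by
      rw [List.take_add_one, List.getElem?_eq_getElem hi']; rfl
    have hdrop : data.drop i = data[i] :: data.drop (i + 1) :=
      List.drop_eq_getElem_cons hi'
    show stepA s i = _
    simp only [stepA]
    simp only [PySem.List.pyGetD_natCast, hsi]
    rw [htake, fillGo_append]
    set L := lastNN none (data.take i) with hLdef
    by_cases hx : data.getD i none = none
    · -- data[i] is None
      have hxe : data[i] = none := by rwa [List.getD_eq_getElem data none hi'] at hx
      rw [if_pos hx]
      by_cases hi0 : i = 0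
      · -- first element: left scan dies at -1, right scan finds the first value
        subst hi0
        have hs0 : s = data := by simp [hsdef, hPdef, List.take_zero, fillGo]
        rw [hs0]
        have hleft : pyWhileLeft data ((0 : Nat) - 1 : Int) = -1 := by
          rw [pyWhileLeft, if_neg (fun h => by
            have := h.1
            simp at this)]
          norm_num
        obtain ⟨hr1, hr2, hr3, hr4⟩ := pyWhileRight_props data (((0 : Nat) : Int) + 1)
        set r := pyWhileRight data (((0 : Nat) : Int) + 1) with hrdef
        have hprefix : ∀ j : Nat, (j : Int) < r → data.getD j none = none := by
          intro j hj
          rcases Nat.eq_zero_or_pos j with h0 | h0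
          · subst h0; simpa using hx
          · have := hr2 (j : Int) (by push_cast; omega) hj
            simpa using this
        have hrlt : r < (data.length : Int) := by
          by_contra hc
          have hrlen : r = (data.length : Int) := le_antisymm (by
            have := hr4 (by push_cast; omega); exact_mod_cast this) (by omega)
          apply hf
          rw [hfdef, firstB_eq_none_iff]
          intro x hxmem
          obtain ⟨k, hk, hke⟩ := List.mem_iff_getElem.1 hxmem
          have := hprefix k (by omega)
          rw [List.getD_eq_getElem data none hk] at this
          rw [← hke, this]
        have hr0 : (0 : Int) ≤ r := by push_cast at hr1; omega
        have hrn : r.toNat < data.length := by omega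
        have hrv : PySem.List.pyGetD data r none = data.getD r.toNat none := by
          rw [PySem.List.pyGetD_eq_getElem data none hr0 hrlt, List.getD_eq_getElem data none hrn]
        have hrne : data.getD r.toNat none ≠ none := by
          rw [← hrv]; exact hr3 hrlt
        have hfeq : f = data.getD r.toNat none := by
          rw [hfdef]
          exact firstB_of_prefix_none data r.toNat
            (fun j hj => hprefix j (by omega)) (by omega) hrne
        rw [hleft]
        rw [if_neg (fun h => by have := h.1; omega), if_pos hrlt, hrv, ← hfeq]
        have hdata0 : data = none :: data.drop 1 := by
          have h0 := List.drop_eq_getElem_cons (l := data) (by omega : 0 < data.length)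
          simpa [hxe] using h0
        conv_lhs => rw [hdata0]
        simp [fillGo, hxe, hLdef, lastNN]
      · -- i > 0: the previous cell is already filled, left stops immediately
        have hi1 : 1 ≤ i := by omega
        have him1 : i - 1 < P.length := by omega
        have hPne : P.getD (i - 1) none ≠ none := by
          rw [List.getD_eq_getElem P none him1]
          exact fillGo_all_some f none (data.take i) hf _ (List.getElem_mem _)
        have hsm1 : s.getD (i - 1) none = P.getD (i - 1) none := by
          rw [List.getD_eq_getElem?_getD, List.getD_eq_getElem?_getD, hsdef,
            List.getElem?_append_left (by omega)]
        have hcast : ((i : Nat) : Int) - 1 = (((i - 1 : Nat) : Nat) : Int) := by omega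
        have hleft : pyWhileLeft s ((i : Int) - 1) = ((i - 1 : Nat) : Int) := by
          rw [pyWhileLeft, if_neg]
          · omega
          · intro h
            have h2 := h.2
            rw [hcast, PySem.List.pyGetD_natCast, hsm1] at h2
            exact hPne h2
        obtain ⟨hr1, _, _, _⟩ := pyWhileRight_props s ((i : Int) + 1)
        set r := pyWhileRight s ((i : Int) + 1) with hrdef
        rw [hleft]
        rw [if_pos ⟨by omega, Or.inr (by omega)⟩]
        have hval : PySem.List.pyGetD s (((i - 1 : Nat) : Nat) : Int) none =
            P.getD (i - 1) none := by
          rw [PySem.List.pyGetD_natCast, hsm1]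
        have hlast : P.getD (i - 1) none = if L = none then f else L := by
          have hg := fillGo_getLast f (data.take i) none (by
            intro hc
            rcases List.take_eq_nil_iff.1 hc with h | h
            · omega
            · subst h
              simp at hi')
          rw [← hPdef, ← hLdef] at hg
          rw [List.getD_eq_getElem P none him1]
          have : P.getLast? = P[P.length - 1]? := List.getLast?_eq_getElem?
          rw [this, hPlen, List.getElem?_eq_getElem him1] at hg
          exact Option.some_injective _ hg
        rw [hval, hlast, hsdef, hdrop, hxe,
          set_append_cons P (data.drop (i + 1)) none _ i hPlen.symm]
        simp [fillGo, hPdef]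
    · -- data[i] is not None: nothing changes
      rw [if_neg hx]
      cases hv : data[i] with
      | none =>
        rw [List.getD_eq_getElem data none hi', hv] at hx
        exact absurd rfl hx
      | some k =>
        rw [hsdef, hdrop, hv]
        simp [fillGo, hPdef]

theorem nearest_neighbor_interpolation_eq (data : List (Option Int)) :
    nearest_neighbor_interpolation data = nearest_neighbor_interpolation_alt data := by
  by_cases hf : firstB data = none
  · have hall := (firstB_eq_none_iff data).1 hf
    unfold nearest_neighbor_interpolation nearest_neighbor_interpolation_alt
    rw [foldl_stepA_fixed data (stepA_allnone data hall)]
    simp [hf]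
  · unfold nearest_neighbor_interpolation nearest_neighbor_interpolation_alt
    rw [inv_stepA data hf data.length (le_refl _)]
    simp only [hf]
    rw [show (data.foldl (fillStep (firstB data)) ([], none)) =
        (data.foldl (fillStep (firstB data)) (([], none) : List (Option Int) × Option Int)) from rfl]
    rw [foldB_eq_fillGo]
    simp

-- ===== VERDICT (by name: the statement is the Claim_ definition above) =====
theorem nearest_neighbor_interpolation_spec : Claim_equal_nearest_neighbor_interpolation := by
  intro data _
  unfold Spec_nearest_neighbor_interpolation
  exact nearest_neighbor_interpolation_eq data
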